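-- pv_equiv track=rewrite | github.com/finskylin/N-Agent | app/channels/feishu/client.py | _count_tables
-- ===== SOURCE A (Python) =====
-- def _count_tables(text: str) -> int:
--     """粗略统计 Markdown 表格数量（以连续含 | 的行块计）"""
--     count = 0
--     in_table = False
--     for line in text.splitlines():
--         stripped = line.strip()
--         if "|" in stripped:
--             if not in_table:
--                 count += 1
--                 in_table = True
--         else:
--             in_table = False
--     return count
-- ===== SOURCE B (Python) =====
-- def _count_tables(text: str) -> int:
--     """粗略统计 Markdown 表格数量（以连续含 | 的行块计）"""
--     flags = ["|" in line for line in text.splitlines()]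
--     return sum(1 for prev, cur in zip([False] + flags, flags) if cur and not prev)
-- ===== Notes on version B (the rewrite author's own statement) =====
-- stated objective: idiomatic
-- what changed: Replaces the stateful in_table flag loop by mapping each line to a has-pipe boolean (dropping the redundant strip) and counting rising edges in that flag list via zip with its shifted copy.
import Mathlib
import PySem

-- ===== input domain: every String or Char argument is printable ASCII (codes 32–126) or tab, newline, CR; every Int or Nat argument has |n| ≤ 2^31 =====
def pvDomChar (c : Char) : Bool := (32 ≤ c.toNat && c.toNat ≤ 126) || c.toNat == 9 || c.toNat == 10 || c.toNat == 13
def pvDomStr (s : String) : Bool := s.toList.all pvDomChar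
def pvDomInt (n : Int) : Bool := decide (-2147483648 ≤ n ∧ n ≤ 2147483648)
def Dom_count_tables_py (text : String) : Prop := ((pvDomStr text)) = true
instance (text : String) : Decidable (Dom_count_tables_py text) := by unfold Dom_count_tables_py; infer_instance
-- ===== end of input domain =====

-- B replaces A's stateful in_table flag loop by per-line has-pipe flags and a rising-edge count (idiomatic decomposition; return value equal on all inputs).
-- ===== PORT A =====
-- literal port of A: fold over splitlines with state (count, in_table)
def count_tables_py (text : String) : Int :=
  let r := (PySem.Str.splitlines text).foldl
    (fun (st : Int × Bool) line =>
      let stripped := PySem.Str.strip line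
      if PySem.Str.isIn "|" stripped then
        if !st.2 then (st.1 + 1, true) else st
      else (st.1, false))
    (0, false)
  r.1

-- ===== PORT B =====
-- port of B: per-line has-pipe flags, then count rising edges via zip with the shifted list
def count_tables_py_alt (text : String) : Int :=
  let flags := (PySem.Str.splitlines text).map (fun line => PySem.Str.isIn "|" line)
  (List.zip (false :: flags) flags).foldl
    (fun (acc : Int) p => if p.2 && !p.1 then acc + 1 else acc) 0

-- ===== PRECONDITION & SPEC =====
def Spec_count_tables_py (text : String) (out : Int) : Prop := out = count_tables_py_alt text
instance (text : String) (out : Int) : Decidable (Spec_count_tables_py text out) := by unfold Spec_count_tables_py; infer_instance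

-- ===== CLAIM (what is proved, stated in full; the proofs are below) =====
def Claim_equal_count_tables_py : Prop := ∀ (text : String), Dom_count_tables_py text → Spec_count_tables_py text (count_tables_py text)

-- ===== LEMMAS AND PROOFS =====

-- ===== VERDICT (by name: the statement is the Claim_ definition above) =====
-- membership in a stripped string: '|' is not whitespace, so strip preserves it
lemma mem_dropWhile_isspace (c : Char) (hc : PySem.Chars.isspace c = false)
    (l : List Char) : c ∈ l.dropWhile PySem.Chars.isspace ↔ c ∈ l := by
  induction l with
  | nil => simp
  | cons h t ih =>
    by_cases hs : PySem.Chars.isspace h = true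
    · simp [List.dropWhile_cons, hs, ih]
      intro he; rw [he] at hc; rw [hs] at hc; exact absurd hc (by simp)
    · simp [List.dropWhile_cons, hs]

lemma mem_strip (c : Char) (hc : PySem.Chars.isspace c = false) (l : List Char) :
    c ∈ PySem.Chars.strip l ↔ c ∈ l := by
  unfold PySem.Chars.strip PySem.Chars.rstrip PySem.Chars.lstrip
  rw [List.mem_reverse, mem_dropWhile_isspace c hc, List.mem_reverse,
    mem_dropWhile_isspace c hc]

lemma singleton_infix_iff (c : Char) (l : List Char) : [c] <:+: l ↔ c ∈ l := by
  constructor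
  · intro h; exact h.subset (by simp)
  · intro h
    obtain ⟨a, b, rfl⟩ := List.append_of_mem h
    exact ⟨a, b, by simp⟩

lemma isIn_pipe_strip (line : String) :
    PySem.Str.isIn "|" (PySem.Str.strip line) = PySem.Str.isIn "|" line := by
  have hsp : PySem.Chars.isspace '|' = false := by decide
  rw [Bool.eq_iff_iff, PySem.Str.isIn_iff_infix, PySem.Str.isIn_iff_infix,
    PySem.Str.toList_strip]
  have h : ("|".toList : List Char) = ['|'] := rfl
  rw [h, singleton_infix_iff, singleton_infix_iff, mem_strip _ hsp]

-- the two loops agree for any previous-flag state t and running count c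
lemma fold_edges (l : List Bool) (c : Int) (t : Bool) :
    (l.foldl (fun (st : Int × Bool) f =>
        if f then (if !st.2 then (st.1 + 1, true) else st) else (st.1, false)) (c, t)).1
      = (List.zip (t :: l) l).foldl
          (fun (acc : Int) p => if p.2 && !p.1 then acc + 1 else acc) c := by
  induction l generalizing c t with
  | nil => simp
  | cons f rest ih =>
    simp only [List.zip_cons_cons, List.foldl_cons]
    cases f <;> cases t <;> simp_all

theorem count_tables_py_spec : Claim_equal_count_tables_py := by
  intro text _
  unfold Spec_count_tables_py count_tables_py count_tables_py_alt
  simp only [isIn_pipe_strip]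
  have := fold_edges ((PySem.Str.splitlines text).map
      (fun line => PySem.Str.isIn "|" line)) 0 false
  rw [List.foldl_map] at this
  exact this
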